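-- pv_equiv track=rewrite | github.com/DimejiAre/code-challenges | python/manasa_and_stones.py | stones
-- ===== SOURCE A (Python) =====
-- def stones(n, a, b):
--     arr = []
--     for i in range(0,n):
--         j = (n-1) - i
--         solution = (i * a) + (j * b)
--         arr.append(solution)
--
--     arr = set(arr)
--     arr = list(arr)
--     arr.sort()
--     return arr
-- ===== SOURCE B (Python) =====
-- def stones(n, a, b):
--     if n <= 0:
--         return []
--     if a == b:
--         return [(n - 1) * a]
--     lo = min(a, b)
--     d = abs(a - b)
--     return [(n - 1) * lo + i * d for i in range(n)]
-- ===== Notes on version B (the rewrite author's own statement) =====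
-- stated objective: faster
-- what changed: Exploits linearity: the values (n-1)*b + i*(a-b) form an arithmetic progression, so B emits them directly in sorted order from min(a,b) with step |a-b| (one value when a==b), with no set or sort.
import Mathlib
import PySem

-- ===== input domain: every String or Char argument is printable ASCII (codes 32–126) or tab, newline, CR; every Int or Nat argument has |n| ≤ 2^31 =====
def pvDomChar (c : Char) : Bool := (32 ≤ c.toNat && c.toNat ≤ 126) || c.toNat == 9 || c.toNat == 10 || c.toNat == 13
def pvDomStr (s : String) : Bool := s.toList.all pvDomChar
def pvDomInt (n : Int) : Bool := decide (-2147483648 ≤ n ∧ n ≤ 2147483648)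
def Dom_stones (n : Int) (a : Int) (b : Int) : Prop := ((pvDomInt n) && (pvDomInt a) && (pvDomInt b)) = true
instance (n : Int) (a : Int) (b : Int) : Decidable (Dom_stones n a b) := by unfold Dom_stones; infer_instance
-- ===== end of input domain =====

-- B replaces A's build-all/set/sort with a direct O(n) emission of the arithmetic
-- progression min(a,b)*(n-1) + i*|a-b| (a single value when a == b), already sorted.

-- ===== PORT A =====
def stones (n : Int) (a : Int) (b : Int) : List Int :=
  let arr := (PySem.List.pyRange 0 n 1).foldl
    (fun acc i => acc ++ [(i * a) + (((n - 1) - i) * b)]) []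
  PySem.List.sorted (PySem.Set.ofList arr) (fun x => x) false

-- ===== PORT B =====
def stones_alt (n : Int) (a : Int) (b : Int) : List Int :=
  if n ≤ 0 then []
  else if a = b then [(n - 1) * a]
  else
    (PySem.List.pyRange 0 n 1).map (fun i => (n - 1) * min a b + i * |a - b|)

-- ===== PRECONDITION & SPEC =====
def Spec_stones (n : Int) (a : Int) (b : Int) (out : List Int) : Prop := out = stones_alt n a b
instance (n : Int) (a : Int) (b : Int) (out : List Int) : Decidable (Spec_stones n a b out) := by unfold Spec_stones; infer_instance

-- ===== CLAIM (what is proved, stated in full; the proofs are below) =====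
def Claim_equal_stones : Prop := ∀ (n : Int) (a : Int) (b : Int), Dom_stones n a b → Spec_stones n a b (stones n a b)

-- ===== LEMMAS AND PROOFS =====

-- set() of a nonempty constant list is the singleton.
theorem ofList_replicate_succ (k : Nat) (c : Int) :
    PySem.Set.ofList (List.replicate (k + 1) c) = [c] := by
  induction k with
  | zero => rfl
  | succ m ih =>
    rw [List.replicate_succ, PySem.Set.ofList_cons, ih]
    simp [PySem.Set.discard]

-- Accumulating appends is mapping.
theorem foldl_append_singleton_map {α β : Type} (f : α → β) (l : List α) (init : List β) :
    l.foldl (fun acc i => acc ++ [f i]) init = init ++ l.map f := by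
  induction l generalizing init with
  | nil => simp
  | cons x xs ih => simp [List.foldl, ih]

-- The loop body of A, as a function of i.
theorem stones_arr_eq (n a b : Int) :
    (PySem.List.pyRange 0 n 1).foldl
      (fun acc i => acc ++ [(i * a) + (((n - 1) - i) * b)]) []
      = (PySem.List.pyRange 0 n 1).map (fun i => (i * a) + (((n - 1) - i) * b)) := by
  simpa using foldl_append_singleton_map (fun i => (i * a) + (((n - 1) - i) * b))
    (PySem.List.pyRange 0 n 1) []

theorem stones_alt_pairwise (n a b : Int) :
    (stones_alt n a b).Pairwise (· < ·) := by
  unfold stones_alt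
  split_ifs with h1 h2
  · exact List.Pairwise.nil
  · simp
  · have hd : (0 : Int) < |a - b| := abs_pos.mpr (sub_ne_zero.mpr h2)
    refine List.Pairwise.map _ ?_ (PySem.List.pairwise_lt_pyRange_one 0 n)
    intro i j hij
    have : i * |a - b| < j * |a - b| := by
      exact mul_lt_mul_of_pos_right hij hd
    omega

theorem stones_alt_perm (n a b : Int) :
    (stones_alt n a b).Perm
      (PySem.Set.ofList
        ((PySem.List.pyRange 0 n 1).map (fun i => (i * a) + (((n - 1) - i) * b)))) := by
  unfold stones_alt
  split_ifs with h1 h2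
  · rw [PySem.List.pyRange_one_eq_nil h1]
    simp [PySem.Set.ofList_nil]
  · -- all values coincide: the deduplicated list is the singleton [(n-1)*a]
    subst h2
    have hmap : (PySem.List.pyRange 0 n 1).map (fun i => (i * a) + (((n - 1) - i) * a))
        = List.replicate ((PySem.List.pyRange 0 n 1).map
            (fun i => (i * a) + (((n - 1) - i) * a))).length ((n - 1) * a) := by
      apply List.eq_replicate_of_mem
      intro x hx
      rcases List.mem_map.mp hx with ⟨i, _, rfl⟩
      ring
    rw [hmap]
    have hlen : ((PySem.List.pyRange 0 n 1).map
        (fun i => (i * a) + (((n - 1) - i) * a))).length = (n - 0).toNat := by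
      rw [List.length_map]; exact PySem.List.length_pyRange_one 0 n
    obtain ⟨k, hk⟩ : ∃ k, ((PySem.List.pyRange 0 n 1).map
        (fun i => (i * a) + (((n - 1) - i) * a))).length = k + 1 :=
      ⟨((PySem.List.pyRange 0 n 1).map
        (fun i => (i * a) + (((n - 1) - i) * a))).length - 1, by omega⟩
    rw [hk, ofList_replicate_succ]
  · -- a ≠ b: the generated values are pairwise distinct, so set() keeps them all
    have hne : a - b ≠ 0 := sub_ne_zero.mpr h2
    have hnodup :
        ((PySem.List.pyRange 0 n 1).map
          (fun i => (i * a) + (((n - 1) - i) * b))).Nodup := by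
      refine List.Nodup.map_on ?_ (PySem.List.nodup_pyRange_one 0 n)
      intro i _ j _ hij
      have : (i - j) * (a - b) = 0 := by ring_nf; linarith
      rcases mul_eq_zero.mp this with h | h
      · omega
      · exact absurd h hne
    rw [PySem.Set.ofList_eq_self_of_nodup _ hnodup]
    rw [List.perm_ext_iff_of_nodup ?_ hnodup]
    · intro x
      simp only [List.mem_map, PySem.List.mem_pyRange_one]
      constructor
      · rintro ⟨i, ⟨h0, hn⟩, rfl⟩
        rcases lt_or_gt_of_ne h2 with hab | hab
        · -- a < b : lo = a, value at index i comes from source index n-1-i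
          refine ⟨n - 1 - i, ⟨by omega, by omega⟩, ?_⟩
          rw [min_eq_left (le_of_lt hab), abs_of_neg (by omega : a - b < 0)]
          ring
        · -- a > b : lo = b, same index
          refine ⟨i, ⟨h0, hn⟩, ?_⟩
          rw [min_eq_right (le_of_lt hab), abs_of_pos (by omega : 0 < a - b)]
          ring
      · rintro ⟨i, ⟨h0, hn⟩, rfl⟩
        rcases lt_or_gt_of_ne h2 with hab | hab
        · refine ⟨n - 1 - i, ⟨by omega, by omega⟩, ?_⟩
          rw [min_eq_left (le_of_lt hab), abs_of_neg (by omega : a - b < 0)]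
          ring
        · refine ⟨i, ⟨h0, hn⟩, ?_⟩
          rw [min_eq_right (le_of_lt hab), abs_of_pos (by omega : 0 < a - b)]
          ring
    · -- Nodup of B's list: strictly increasing
      refine List.Nodup.map_on ?_ (PySem.List.nodup_pyRange_one 0 n)
      intro i _ j _ hij
      have hd : (0 : Int) < |a - b| := abs_pos.mpr (sub_ne_zero.mpr h2)
      have : (i - j) * |a - b| = 0 := by ring_nf; linarith
      rcases mul_eq_zero.mp this with h | h
      · omega
      · omega

-- ===== VERDICT (by name: the statement is the Claim_ definition above) =====
theorem stones_spec : Claim_equal_stones := by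
  intro n a b _
  unfold Spec_stones stones
  rw [stones_arr_eq]
  exact PySem.List.sorted_eq_of_perm_of_pairwise_lt _ _ _
    (stones_alt_perm n a b) (stones_alt_pairwise n a b)
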